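-- pv_equiv track=rewrite | github.com/Wail311/sales-lookup | lookup_app.py | detect_barcode_col
-- ===== SOURCE A (Python) =====
-- def detect_barcode_col(cols: list[str]) -> str | None:
--     """
--     Return the first column name that looks like a barcode field.
--     Match is case/space-insensitive.
--     """
--     candidates = [
--         "barcode", "bar code", "ean", "ean13", "upc", "gtin",
--         "sku_barcode", "sku barcode", "code", "product code"
--     ]
--     low = {str(c).lower().strip(): c for c in cols}
--     for k in candidates:
--         if k in low:
--             return low[k]
--     return None
-- ===== SOURCE B (Python) =====
-- def detect_barcode_col(cols: list[str]) -> str | None: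
--     """
--     Return the first column name that looks like a barcode field.
--     Match is case/space-insensitive.
--     """
--     candidates = [
--         "barcode", "bar code", "ean", "ean13", "upc", "gtin",
--         "sku_barcode", "sku barcode", "code", "product code"
--     ]
--     best = None
--     best_rank = len(candidates)
--     for c in cols:
--         r = _rank(str(c).lower().strip(), candidates)
--         if r is not None and r < best_rank:
--             best, best_rank = c, r
--     return best
--
--
-- def _rank(name, labels):
--     for i, k in enumerate(labels):
--         if k == name:
--             return i
--     return None
-- ===== Notes on version B (the rewrite author's own statement) =====
-- stated objective: alternative
-- what changed: B replaces A's build-a-normalized-dict-then-try-candidates strategy with a single pass over the columns keeping the best (lowest) candidate rank seen so far; Pre_ excludes lists where two distinct column strings normalize to the same candidate label, where A's dict-overwrite (last column wins) order is accidental and B naturally keeps the first.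
-- outside the precondition, e.g. on detect_barcode_col(['Barcode', ' BARCODE ']): A returns ' BARCODE ', B returns 'Barcode'
import Mathlib
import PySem

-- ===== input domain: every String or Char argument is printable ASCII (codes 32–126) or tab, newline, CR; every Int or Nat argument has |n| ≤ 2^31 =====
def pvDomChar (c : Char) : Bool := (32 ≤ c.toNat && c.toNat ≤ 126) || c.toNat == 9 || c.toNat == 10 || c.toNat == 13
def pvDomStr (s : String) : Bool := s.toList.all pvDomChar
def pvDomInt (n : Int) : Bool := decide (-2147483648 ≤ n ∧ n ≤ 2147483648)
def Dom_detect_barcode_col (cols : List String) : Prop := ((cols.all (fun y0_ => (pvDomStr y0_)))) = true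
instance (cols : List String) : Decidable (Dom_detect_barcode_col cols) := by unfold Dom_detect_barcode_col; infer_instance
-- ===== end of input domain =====

-- B replaces A's normalized-dict-then-try-candidates strategy by a single pass over the
-- columns keeping the best (lowest) candidate rank seen so far (objective: alternative).

def pvCandidates : List String :=
  ["barcode", "bar code", "ean", "ean13", "upc", "gtin",
   "sku_barcode", "sku barcode", "code", "product code"]

def pvNorm (c : String) : String := PySem.Str.strip (PySem.Str.lower c)

-- ===== PORT A =====
-- the 'for k in candidates: if k in low: return low[k]' loop
def pvLookupA (low : PySem.Dict String String) : List String → Option String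
  | [] => none
  | k :: ks => if low.contains k then low.get? k else pvLookupA low ks

def detect_barcode_col (cols : List String) : Option String :=
  let low := cols.foldl (fun d c => d.insert (pvNorm c) c) PySem.Dict.empty
  pvLookupA low pvCandidates

-- ===== PORT B =====
-- '_rank(name, labels)': index of the first label equal to name, None if absent
def pvRank (name : String) : List String → Option Nat
  | [] => none
  | k :: ks => if k == name then some 0 else (pvRank name ks).map (· + 1)

-- the single pass 'for c in cols: r = _rank(...); if r is not None and r < best_rank: …'
def detect_barcode_col_alt (cols : List String) : Option String :=
  (cols.foldl
    (fun st c =>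
      match pvRank (pvNorm c) pvCandidates with
      | some r => if r < st.2 then (some c, r) else st
      | none => st)
    ((none : Option String), pvCandidates.length)).1

-- ===== PRECONDITION & SPEC =====
-- Pre_ excludes lists in which two DISTINCT column strings normalize to the same candidate
-- label: there A's dict-comprehension overwrite makes the LAST such column win, an accidental
-- order, while B naturally keeps the first; both values are defensible on that unspecified corner.
def Pre_detect_barcode_col (cols : List String) : Prop :=
  List.Pairwise (fun a b => pvNorm a ∈ pvCandidates → pvNorm a = pvNorm b → a = b) cols
instance (cols : List String) : Decidable (Pre_detect_barcode_col cols) := by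
  unfold Pre_detect_barcode_col; infer_instance

def pvWitness_detect_barcode_col : List String := ["name", "Barcode ", "price"]

def Spec_detect_barcode_col (cols : List String) (out : Option String) : Prop :=
  out = detect_barcode_col_alt cols
instance (cols : List String) (out : Option String) : Decidable (Spec_detect_barcode_col cols out) := by
  unfold Spec_detect_barcode_col; infer_instance

-- ===== CLAIM (what is proved, stated in full; the proofs are below) =====
def Claim_equal_detect_barcode_col : Prop :=
  ∀ (cols : List String), Dom_detect_barcode_col cols → Pre_detect_barcode_col cols →
    Spec_detect_barcode_col cols (detect_barcode_col cols)

-- ===== LEMMAS AND PROOFS =====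

theorem pvWitness_ok :
    Dom_detect_barcode_col pvWitness_detect_barcode_col ∧
    Pre_detect_barcode_col pvWitness_detect_barcode_col := by decide

-- the common reference: candidate-order search returning the FIRST matching column
def pvSearch (cols : List String) : List String → Option String
  | [] => none
  | k :: ks =>
    match cols.find? (fun c => pvNorm c == k) with
    | some c => some c
    | none => pvSearch cols ks

-- last-match scan (what A's dict lookup computes)
def pvLastMatch (cols : List String) (k : String) : Option String :=
  cols.foldl (fun found c => if pvNorm c == k then some c else found) none

def pvSearchLast (cols : List String) : List String → Option String
  | [] => none
  | k :: ks =>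
    match pvLastMatch cols k with
    | some v => some v
    | none => pvSearchLast cols ks

-- ---- A side ----

-- the fold-built dict's lookup at k equals the last-match scan, from any starting dict
theorem pvGet_fold_eq_lastMatch (cols : List String) (k : String) (d : PySem.Dict String String) :
    (cols.foldl (fun d c => d.insert (pvNorm c) c) d).get? k
      = cols.foldl (fun found c => if pvNorm c == k then some c else found) (d.get? k) := by
  induction cols generalizing d with
  | nil => rfl
  | cons c cs ih =>
    simp only [List.foldl]
    rw [ih]
    by_cases h : pvNorm c = k
    · subst h; simp [PySem.Dict.get?_insert_self]
    · rw [PySem.Dict.get?_insert_of_ne _ _ (by exact fun e => h e.symm)]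
      simp [h]

theorem pvLookupA_eq_searchLast (cols : List String) (ks : List String) :
    pvLookupA (cols.foldl (fun d c => d.insert (pvNorm c) c) PySem.Dict.empty) ks
      = pvSearchLast cols ks := by
  induction ks with
  | nil => rfl
  | cons k ks ih =>
    simp only [pvLookupA, pvSearchLast]
    have hget : (cols.foldl (fun d c => d.insert (pvNorm c) c) PySem.Dict.empty).get? k
        = pvLastMatch cols k := by
      rw [pvGet_fold_eq_lastMatch]; rfl
    by_cases h : (cols.foldl (fun d c => d.insert (pvNorm c) c) PySem.Dict.empty).contains k
    · rw [if_pos h, hget]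
      rcases hm : pvLastMatch cols k with _ | v
      · exfalso
        have := (PySem.Dict.get?_eq_none_iff_contains (d := cols.foldl (fun d c => d.insert (pvNorm c) c) PySem.Dict.empty) (k := k))
        rw [hget, hm] at this
        simp at this
        exact absurd h (by simp [this])
      · rfl
    · rw [if_neg h]
      have hn : pvLastMatch cols k = none := by
        rw [← hget]
        have := (PySem.Dict.get?_eq_none_iff_contains (d := cols.foldl (fun d c => d.insert (pvNorm c) c) PySem.Dict.empty) (k := k))
        simp only [Bool.not_eq_true] at h
        simp [this, h]
      rw [hn, ih]

-- a last-wins fold over a list whose every match equals c keeps (some c)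
theorem pvLastMatch_aux_eq (k c : String) (cs : List String)
    (h : ∀ b ∈ cs, pvNorm b = k → b = c) :
    cs.foldl (fun found x => if pvNorm x == k then some x else found) (some c) = some c := by
  induction cs with
  | nil => rfl
  | cons b bs ih =>
    simp only [List.foldl]
    by_cases hb : pvNorm b = k
    · rw [if_pos (by simpa using hb), h b (by simp) hb]
      exact ih (fun x hx => h x (by simp [hx]))
    · rw [if_neg (by simpa using hb)]
      exact ih (fun x hx => h x (by simp [hx]))

-- when all matches are the same string, the last match is the first match
theorem pvLastMatch_eq_find (k : String) (cols : List String)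
    (h : List.Pairwise (fun a b => pvNorm a = k → pvNorm b = k → a = b) cols) :
    pvLastMatch cols k = cols.find? (fun c => pvNorm c == k) := by
  induction cols with
  | nil => rfl
  | cons c cs ih =>
    rcases List.pairwise_cons.1 h with ⟨hc, hcs⟩
    unfold pvLastMatch
    simp only [List.foldl]
    by_cases hk : pvNorm c = k
    · rw [if_pos (by simpa using hk)]
      rw [pvLastMatch_aux_eq k c cs (fun b hb hbk => (hc b hb hk hbk).symm)]
      rw [List.find?_cons_of_pos (by simpa using hk)]
    · rw [if_neg (by simpa using hk)]
      rw [show (List.foldl (fun found c => if pvNorm c == k then some c else found)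
            (none : Option String) cs) = pvLastMatch cs k from rfl, ih hcs]
      rw [List.find?_cons_of_neg (by simpa using hk)]

theorem pvSearchLast_eq_search (cols : List String)
    (hp : Pre_detect_barcode_col cols) (ks : List String)
    (hks : ∀ k ∈ ks, k ∈ pvCandidates) :
    pvSearchLast cols ks = pvSearch cols ks := by
  induction ks with
  | nil => rfl
  | cons k ks ih =>
    have hk : k ∈ pvCandidates := hks k (by simp)
    have hpk : List.Pairwise (fun a b => pvNorm a = k → pvNorm b = k → a = b) cols := by
      refine hp.imp ?_
      intro a b hab ha hb
      exact hab (ha ▸ hk) (ha.trans hb.symm)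
    simp only [pvSearchLast, pvSearch, pvLastMatch_eq_find k cols hpk]
    cases cols.find? (fun c => pvNorm c == k) with
    | some v => rfl
    | none => exact ih (fun x hx => hks x (by simp [hx]))

-- ---- B side ----

-- a successful rank splits the label list: j earlier labels, none equal to name
theorem pvRank_some_split (name : String) (ks : List String) (j : Nat)
    (h : pvRank name ks = some j) :
    ∃ ks₁ ks₂, ks = ks₁ ++ name :: ks₂ ∧ ks₁.length = j ∧ name ∉ ks₁ := by
  induction ks generalizing j with
  | nil => simp [pvRank] at h
  | cons k ks ih =>
    by_cases hk : k = name
    · subst hk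
      have hj : j = 0 := by simp [pvRank] at h; omega
      subst hj
      exact ⟨[], ks, rfl, rfl, by simp⟩
    · rcases hr : pvRank name ks with _ | i
      · simp [pvRank, hk, hr] at h
      · simp [pvRank, hk, hr] at h
        rcases ih i hr with ⟨ks₁, ks₂, he, hl, hn⟩
        refine ⟨k :: ks₁, ks₂, by simp [he], by simp [hl]; omega, ?_⟩
        intro hm
        rcases List.mem_cons.1 hm with e | e
        · exact hk e.symm
        · exact hn e

theorem pvRank_none_not_mem (name : String) (ks : List String) :
    pvRank name ks = none → name ∉ ks := by
  induction ks with
  | nil => simp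
  | cons k ks ih =>
    intro h hm
    by_cases hk : k = name
    · simp [pvRank, hk] at h
    · rcases hr : pvRank name ks with _ | i
      · rcases List.mem_cons.1 hm with e | e
        · exact hk e.symm
        · exact ih hr e
      · simp [pvRank, hk, hr] at h

theorem pvSearch_nil (ks : List String) : pvSearch [] ks = none := by
  induction ks with
  | nil => rfl
  | cons k ks ih => simpa [pvSearch] using ih

-- candidate-order search splits over append
theorem pvSearch_append (cols : List String) (ks₁ ks₂ : List String) :
    pvSearch cols (ks₁ ++ ks₂)
      = match pvSearch cols ks₁ with
        | some d => some d
        | none => pvSearch cols ks₂ := by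
  induction ks₁ with
  | nil => simp [pvSearch]
  | cons k ks ih =>
    simp only [List.cons_append, pvSearch]
    cases cols.find? (fun c => pvNorm c == k) with
    | some v => rfl
    | none => exact ih

-- a head column matching no label can be dropped
theorem pvSearch_skip (c : String) (cs : List String) (ks : List String)
    (h : ∀ k ∈ ks, pvNorm c ≠ k) :
    pvSearch (c :: cs) ks = pvSearch cs ks := by
  induction ks with
  | nil => rfl
  | cons k ks ih =>
    simp only [pvSearch]
    rw [List.find?_cons_of_neg (by simpa using h k (by simp))]
    cases cs.find? (fun x => pvNorm x == k) with
    | some v => rfl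
    | none => exact ih (fun x hx => h x (by simp [hx]))

-- the single-pass fold from any state computes the search below the cutoff, else the accumulator
theorem pvFold_eq_search (cs : List String) (b : Option String) (r : Nat) :
    (cs.foldl
      (fun st c =>
        match pvRank (pvNorm c) pvCandidates with
        | some j => if j < st.2 then (some c, j) else st
        | none => st)
      (b, r)).1
      = match pvSearch cs (pvCandidates.take r) with
        | some d => some d
        | none => b := by
  induction cs generalizing b r with
  | nil => simp [pvSearch_nil]
  | cons c cs ih =>
    simp only [List.foldl]
    rcases hr : pvRank (pvNorm c) pvCandidates with _ | j
    · -- no rank: c matches no candidate, skip on both sides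
      have hnm : pvNorm c ∉ pvCandidates := pvRank_none_not_mem _ _ hr
      rw [ih b r, pvSearch_skip c cs _ (fun k hk hek =>
        hnm (by rw [hek]; exact List.mem_of_mem_take hk))]
    · rcases pvRank_some_split _ _ _ hr with ⟨ks₁, ks₂, he, hl, hn⟩
      have hred : (match (some j : Option Nat) with
          | some j => if j < r then ((some c : Option String), j) else (b, r)
          | none => (b, r)) = if j < r then (some c, j) else (b, r) := rfl
      rw [hred]
      by_cases hj : j < r
      · rw [if_pos hj]
        have htj : pvCandidates.take j = ks₁ := by
          rw [he, List.take_append, List.take_of_length_le (by omega)]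
          have h0 : j - ks₁.length = 0 := by omega
          simp [h0]
        have htr : pvCandidates.take r = ks₁ ++ pvNorm c :: (ks₂.take (r - j - 1)) := by
          rw [he, List.take_append, List.take_of_length_le (by omega)]
          have h2 : r - ks₁.length = (r - j - 1) + 1 := by omega
          rw [h2, List.take_succ_cons]
        rw [ih (some c) j, htj, htr, pvSearch_append]
        rw [pvSearch_skip c cs ks₁ (fun k hk hek => hn (hek ▸ hk))]
        cases pvSearch cs ks₁ with
        | some d => rfl
        | none =>
          simp only [pvSearch]
          rw [List.find?_cons_of_pos (by simp)]
      · rw [if_neg hj, ih b r]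
        have hsub : pvCandidates.take r = ks₁.take r := by
          rw [he, List.take_append]
          have h0 : r - ks₁.length = 0 := by omega
          simp [h0]
        rw [pvSearch_skip c cs _ (fun k hk hek => by
          rw [hsub] at hk
          exact hn (hek ▸ List.mem_of_mem_take hk))]

theorem pvB_eq_search (cols : List String) :
    detect_barcode_col_alt cols = pvSearch cols pvCandidates := by
  unfold detect_barcode_col_alt
  rw [pvFold_eq_search cols none pvCandidates.length, List.take_length]
  cases pvSearch cols pvCandidates with
  | some d => rfl
  | none => rfl

-- ===== VERDICT (by name: the statement is the Claim_ definition above) =====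
theorem detect_barcode_col_spec : Claim_equal_detect_barcode_col := by
  intro cols _ hp
  unfold Spec_detect_barcode_col detect_barcode_col
  rw [pvB_eq_search, pvLookupA_eq_searchLast,
    pvSearchLast_eq_search cols hp pvCandidates (fun k hk => hk)]
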